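-- pv_equiv track=rewrite | github.com/aGGre55or/AROS | workbench/system/AboutAROS/scripts/authors2header.py | parse
-- ===== SOURCE A (Python) =====
-- def parse(file):
--     credits = []
--     names   = []
--
--     for line in file:
--         line = line.strip()
--
--         if ':' in line:
--             if len(names) > 0:
--                 credits.append([area, names])
--
--             area = line[:-1]
--
--             names = []
--
--         elif line != '':
--             names.append(line)
--
--     if len(names) > 0:
--         credits.append([area, names])
--
--     return credits
-- ===== SOURCE B (Python) =====
-- def parse(file):
--     lines = [line.strip() for line in file]
--     # skip anything before the first section header (A raises NameError on
--     # a non-empty name line there; such inputs are outside Pre_)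
--     k = 0
--     while k < len(lines) and ':' not in lines[k]:
--         k += 1
--     credits = []
--     while k < len(lines):
--         header = lines[k]
--         k += 1
--         start = k
--         while k < len(lines) and ':' not in lines[k]:
--             k += 1
--         names = [line for line in lines[start:k] if line]
--         if names:
--             credits.append([header[:-1], names])
--     return credits
-- ===== Notes on version B (the rewrite author's own statement) =====
-- stated objective: simpler
-- what changed: Replaces A's single-pass state machine (pending names buffer, two flush sites, an unbound 'area' variable) by strip-then-segment: scan to each header and take its span of following name lines as one group; Pre_ excludes only the inputs where A raises NameError (a name line before any header).
import Mathlib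
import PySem

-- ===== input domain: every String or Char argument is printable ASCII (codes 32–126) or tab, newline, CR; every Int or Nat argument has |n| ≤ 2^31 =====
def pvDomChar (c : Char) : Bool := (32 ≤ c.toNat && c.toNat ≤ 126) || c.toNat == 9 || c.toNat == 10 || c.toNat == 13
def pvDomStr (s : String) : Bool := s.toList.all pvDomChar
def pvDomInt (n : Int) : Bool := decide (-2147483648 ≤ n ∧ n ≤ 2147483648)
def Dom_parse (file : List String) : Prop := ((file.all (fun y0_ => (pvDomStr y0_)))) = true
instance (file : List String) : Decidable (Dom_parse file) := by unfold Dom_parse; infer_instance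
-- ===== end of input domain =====

-- B replaces A's stateful buffer-and-flush loop by strip-then-segment (each header's
-- span of following name lines becomes one group); same outputs, no speed claim.

-- ===== PORT A =====
-- state = (credits, names, area); Python's unbound 'area' is modelled as "" — under
-- Pre_parse it is never read before a header assigns it.
def parseStep (st : List (String × List String) × List String × String) (raw : String) :
    List (String × List String) × List String × String :=
  let line := PySem.Str.strip raw
  if PySem.Str.isIn ":" line then
    let credits := if st.2.1.length > 0 then st.1 ++ [(st.2.2, st.2.1)] else st.1
    (credits, [], PySem.Str.slice line none (some (-1)))
  else if line ≠ "" then (st.1, st.2.1 ++ [line], st.2.2)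
  else st

def parse (file : List String) : List (String × List String) :=
  let st := file.foldl parseStep ([], [], "")
  if st.2.1.length > 0 then st.1 ++ [(st.2.2, st.2.1)] else st.1

-- ===== PORT B =====
-- the outer while-loop of Source B, fuel-bounded for totality (fuel = number of remaining
-- lines, strictly enough since each round consumes at least the header line);
-- the inner while-scan of Source B = takeWhile/dropWhile over the remaining lines
def collectGroups : Nat → List String → List (String × List String)
  | _, [] => []
  | 0, _ :: _ => []
  | fuel + 1, h :: rest =>
    let names := (rest.takeWhile (fun l => !(PySem.Str.isIn ":" l))).filter (fun l => !(l == ""))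
    (if names ≠ [] then [(PySem.Str.slice h none (some (-1)), names)] else []) ++
      collectGroups fuel (rest.dropWhile (fun l => !(PySem.Str.isIn ":" l)))

def parse_alt (file : List String) : List (String × List String) :=
  collectGroups file.length ((file.map PySem.Str.strip).dropWhile (fun l => !(PySem.Str.isIn ":" l)))

-- ===== PRECONDITION & SPEC =====
-- Pre_ excludes exactly the inputs on which A raises NameError ('area' unbound at the
-- first flush): those with a non-empty (after strip) non-header line before the first
-- header line; B returns the groups of the remaining input there.
def Pre_parse (file : List String) : Prop :=
  (((file.map PySem.Str.strip).takeWhile (fun l => !(PySem.Str.isIn ":" l))).all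
    (fun l => l == "")) = true
instance (file : List String) : Decidable (Pre_parse file) := by unfold Pre_parse; infer_instance

def pvWitness_parse : List String := [" Gfx: ", "alice", "", "bob"]

def Spec_parse (file : List String) (out : List (String × List String)) : Prop := out = parse_alt file
instance (file : List String) (out : List (String × List String)) : Decidable (Spec_parse file out) := by unfold Spec_parse; infer_instance

-- ===== CLAIM (what is proved, stated in full; the proofs are below) =====
def Claim_equal_parse : Prop := ∀ (file : List String), Dom_parse file → Pre_parse file → Spec_parse file (parse file)

-- ===== LEMMAS AND PROOFS =====

-- reference recursion equal to A's fold (proof-only helper)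
def goA (area : String) (names : List String) : List String → List (String × List String)
  | [] => if names.length > 0 then [(area, names)] else []
  | l :: ls =>
    if PySem.Str.isIn ":" l then
      (if names.length > 0 then [(area, names)] else []) ++
        goA (PySem.Str.slice l none (some (-1))) [] ls
    else if l ≠ "" then goA area (names ++ [l]) ls
    else goA area names ls

theorem parse_eq_goA (ls : List String) :
    ∀ (credits : List (String × List String)) (names : List String) (area : String),
    (let st := ls.foldl parseStep (credits, names, area);
      if st.2.1.length > 0 then st.1 ++ [(st.2.2, st.2.1)] else st.1)
    = credits ++ goA area names (ls.map PySem.Str.strip) := by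
  induction ls with
  | nil =>
    intro credits names area
    simp only [List.foldl_nil, List.map_nil, goA]
    split <;> simp
  | cons l ls ih =>
    intro credits names area
    simp only [List.foldl_cons, List.map_cons, goA, parseStep]
    by_cases h1 : PySem.Str.isIn ":" (PySem.Str.strip l) = true
    · simp only [h1, ↓reduceIte]
      rw [ih]
      split <;> simp
    · simp only [h1, Bool.false_eq_true, ↓reduceIte]
      by_cases h2 : PySem.Str.strip l = ""
      · simp only [h2, ↓reduceIte, ite_not]
        rw [ih]
      · simp only [h2, ↓reduceIte, ite_not]
        rw [ih]

theorem goA_eq_collect (ls : List String) :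
    ∀ (n : Nat), ls.length ≤ n → ∀ (area : String) (names : List String),
    goA area names ls =
      (if (names ++ (ls.takeWhile (fun l => !(PySem.Str.isIn ":" l))).filter
            (fun l => !(l == ""))).length > 0 then
         [(area, names ++ (ls.takeWhile (fun l => !(PySem.Str.isIn ":" l))).filter
            (fun l => !(l == "")))]
       else []) ++
        collectGroups n (ls.dropWhile (fun l => !(PySem.Str.isIn ":" l))) := by
  induction ls with
  | nil =>
    intro n _ area names
    simp only [goA, List.takeWhile_nil, List.filter_nil, List.append_nil,
      List.dropWhile_nil]
    cases n <;> simp [collectGroups]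
  | cons l ls ih =>
    intro n hn area names
    by_cases h1 : PySem.Str.isIn ":" l = true
    · obtain ⟨m, rfl⟩ : ∃ m, n = m + 1 := by
        cases n
        · simp at hn
        · exact ⟨_, rfl⟩
      have hm : ls.length ≤ m := by simpa using hn
      simp only [goA, h1, ↓reduceIte, List.takeWhile_cons, Bool.not_true,
        Bool.false_eq_true, List.filter_nil, List.append_nil, List.dropWhile_cons,
        collectGroups]
      rw [ih m hm]
      simp only [List.nil_append, ne_eq, ← List.length_pos_iff]
    · have h1' : PySem.Str.isIn ":" l = false := by simpa using h1
      by_cases h2 : l = ""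
      · subst h2
        simp only [goA, h1', Bool.false_eq_true, ↓reduceIte, ne_eq,
          not_true_eq_false, List.takeWhile_cons, Bool.not_false, List.filter_cons,
          List.dropWhile_cons]
        rw [ih n (Nat.le_of_succ_le hn)]
        simp
      · simp only [goA, h1', Bool.false_eq_true, ↓reduceIte, h2, ne_eq,
          not_false_eq_true, List.takeWhile_cons, Bool.not_false, List.filter_cons,
          List.dropWhile_cons]
        rw [ih n (Nat.le_of_succ_le hn)]
        have : (!(l == "")) = true := by simpa using h2
        simp [this, List.append_assoc]

theorem filter_eq_nil_of_all_empty (ls : List String)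
    (h : (ls.all (fun l => l == "")) = true) :
    ls.filter (fun l => !(l == "")) = [] := by
  induction ls with
  | nil => rfl
  | cons l ls ih =>
    simp only [List.all_cons, Bool.and_eq_true] at h
    simp [h.1, ih h.2]

-- ===== VERDICT (by name: the statement is the Claim_ definition above) =====
theorem parse_spec : Claim_equal_parse := by
  intro file _ hpre
  unfold Spec_parse parse parse_alt
  rw [parse_eq_goA]
  rw [goA_eq_collect _ (file.map PySem.Str.strip).length (by simp) "" []]
  rw [filter_eq_nil_of_all_empty _ hpre]
  simp
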